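-- pv_equiv track=rewrite | github.com/coremedy/Python-Algorithms-DataStructure | Python-Algorithms-DataStructure/src/coursera/PrinciplesOfComputing/Yahtzee/strategy.py | gen_all_holds
-- ===== SOURCE A (Python) =====
-- def gen_all_holds(hand):
--     """
--     Generate all possible choices of dice from hand to hold.
--
--     hand: full yahtzee hand
--
--     Returns a set of tuples, where each tuple is dice to hold
--     """
--
--     result_set = set([()])
--     # Handle empty condition
--     if len(hand) > 0:
--         for index in range(0, len(hand)):
--             # Do not add the tuple into result_set directly
--             # Because this changes the size of the set during interation
--             intermediate_result_set = set()
--             for every_tuple in result_set: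
--                 new_subset_as_list = list(every_tuple)
--                 new_subset_as_list.append(hand[index])
--                 intermediate_result_set.add(tuple(sorted(new_subset_as_list)))
--             result_set.update(intermediate_result_set)
--
--     return result_set
-- ===== SOURCE B (Python) =====
-- def gen_all_holds(hand):
--     """
--     Generate all possible choices of dice from hand to hold.
--
--     hand: full yahtzee hand
--
--     Returns a set of tuples, where each tuple is dice to hold
--     """
--     if not hand:
--         return {()}
--     result = gen_all_holds(hand[:-1])
--     result.update({tuple(sorted(t + (hand[-1],))) for t in result})
--     return result
-- ===== Notes on version B (the rewrite author's own statement) =====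
-- stated objective: simpler
-- what changed: B replaces A's iterative index loop with its explicit inner loop (copy each held tuple to a list, append, re-sort, collect into an intermediate set, then update) by a three-line recursive decomposition: the holds of hand are the holds of hand[:-1] updated with each held tuple extended by the last die via a set comprehension.
import Mathlib
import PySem

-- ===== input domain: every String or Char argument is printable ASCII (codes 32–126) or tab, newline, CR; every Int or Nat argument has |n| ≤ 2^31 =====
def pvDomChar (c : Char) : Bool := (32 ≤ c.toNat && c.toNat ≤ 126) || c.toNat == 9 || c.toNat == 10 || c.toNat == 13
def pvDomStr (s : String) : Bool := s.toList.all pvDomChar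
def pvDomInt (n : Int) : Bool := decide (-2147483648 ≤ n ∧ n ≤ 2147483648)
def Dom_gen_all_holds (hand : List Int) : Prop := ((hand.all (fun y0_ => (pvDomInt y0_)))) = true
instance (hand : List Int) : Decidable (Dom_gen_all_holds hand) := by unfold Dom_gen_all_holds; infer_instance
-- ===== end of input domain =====

-- B replaces A's iterative index loop (explicit inner loop, intermediate set, update) by a
-- recursive decomposition over hand[:-1] with a set comprehension; equal output proved.
-- (B mutates the set its recursive call built before returning it; that set is local to B,
-- so no argument of the function is mutated.)


-- ===== PORT A =====
def gen_all_holds (hand : List Int) : List (List Int) :=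
  let result := PySem.Set.ofList [([] : List Int)]
  if PySem.List.len hand > 0 then
    (PySem.List.pyRange 0 (PySem.List.len hand) 1).foldl
      (fun result_set index =>
        let intermediate := result_set.foldl
          (fun s t =>
            PySem.Set.add s
              (PySem.List.sorted (t ++ [PySem.List.pyGetD hand index 0]) (fun v => v) false))
          PySem.Set.empty
        PySem.Set.update result_set intermediate)
      result
  else result

-- ===== PORT B =====
def gen_all_holds_alt (hand : List Int) : List (List Int) :=
  if hand = [] then PySem.Set.ofList [[]]
  else
    let result := gen_all_holds_alt (PySem.List.slice hand none (some (-1)))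
    PySem.Set.update result
      (PySem.Set.ofList (result.map (fun t =>
        PySem.List.sorted (t ++ [PySem.List.pyGetD hand (-1) 0]) (fun v => v) false)))
termination_by hand.length
decreasing_by
  rw [PySem.List.slice_to_neg_one]
  have h : hand ≠ [] := by assumption
  cases hand with
  | nil => exact absurd rfl h
  | cons a l => simp

-- ===== PRECONDITION & SPEC =====
def Spec_gen_all_holds (hand : List Int) (out : List (List Int)) : Prop := out = gen_all_holds_alt hand
instance (hand : List Int) (out : List (List Int)) : Decidable (Spec_gen_all_holds hand out) := by unfold Spec_gen_all_holds; infer_instance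

-- ===== CLAIM (what is proved, stated in full; the proofs are below) =====
def Claim_equal_gen_all_holds : Prop := ∀ (hand : List Int), Dom_gen_all_holds hand → Spec_gen_all_holds hand (gen_all_holds hand)

-- ===== LEMMAS AND PROOFS =====

-- abbreviation for sorted(·) with the identity key
def pvSortId (t : List Int) : List Int := PySem.List.sorted t (fun v => v) false

-- B's recursion over hand[:-1] unrolls to a left fold over the hand
lemma pvB_foldl (hand : List Int) :
    gen_all_holds_alt hand
    = hand.foldl
        (fun s x => PySem.Set.update s (PySem.Set.ofList (s.map (fun t => pvSortId (t ++ [x])))))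
        (PySem.Set.ofList [[]]) := by
  induction hand using List.reverseRecOn with
  | nil => rw [gen_all_holds_alt]; rfl
  | append_singleton xs x ih =>
      rw [gen_all_holds_alt]
      have hne : ¬(xs ++ [x] = []) := by simp
      rw [if_neg hne, PySem.List.slice_to_neg_one, List.dropLast_concat,
          PySem.List.pyGetD_neg_one_append_singleton, ih, List.foldl_append,
          List.foldl_cons, List.foldl_nil]
      rfl

-- one A-step: the inner accumulation loop is an update by the mapped image
lemma pvA_step (s : PySem.Set (List Int)) (v : Int) :
    PySem.Set.update s
      (s.foldl (fun g t => PySem.Set.add g (pvSortId (t ++ [v]))) PySem.Set.empty)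
    = PySem.Set.update s (PySem.Set.ofList (s.map (fun t => pvSortId (t ++ [v])))) := by
  rw [← PySem.Set.update_map_eq_foldl_add s (fun t => pvSortId (t ++ [v])) PySem.Set.empty,
      PySem.Set.update_empty]

-- ===== VERDICT (by name: the statement is the Claim_ definition above) =====
theorem gen_all_holds_spec : Claim_equal_gen_all_holds := by
  intro hand _
  unfold Spec_gen_all_holds
  rw [gen_all_holds, pvB_foldl]
  by_cases h : hand = []
  · subst h; rfl
  · have hlen : PySem.List.len hand > 0 := by
      rw [PySem.List.len_eq]
      exact_mod_cast List.length_pos_iff.mpr h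
    simp only [hlen, if_pos]
    rw [PySem.List.foldl_pyRange_zero_pyGetD hand 0
      (fun result_set v =>
        PySem.Set.update result_set
          (result_set.foldl
            (fun s t => PySem.Set.add s (PySem.List.sorted (t ++ [v]) (fun v => v) false))
            PySem.Set.empty))
      (PySem.Set.ofList [[]])]
    have hfun : (fun (result_set : PySem.Set (List Int)) (v : Int) =>
        PySem.Set.update result_set
          (result_set.foldl
            (fun s t => PySem.Set.add s (PySem.List.sorted (t ++ [v]) (fun v => v) false))
            PySem.Set.empty))
        = fun s x =>
            PySem.Set.update s (PySem.Set.ofList (s.map (fun t => pvSortId (t ++ [x])))) := by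
      funext s v
      exact pvA_step s v
    rw [hfun]
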